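-- pv_equiv track=rewrite | github.com/jongharyu/neural-svd | examples/operator/pde/schrodinger/ground_truths.py | get_qnums
-- ===== SOURCE A (Python) =====
-- def get_qnums(neigs):
--     qnums = []
--     for n in range(1, 100):  # TODO: fix
--         for i in range(1, n):
--             qnums.append((n, i))
--             qnums.append((i, n))
--         qnums.append((n, n))
--     return qnums[:neigs]
-- ===== SOURCE B (Python) =====
-- def get_qnums(neigs):
--     # All quantum-number pairs with both coordinates in 1..99, ordered by
--     # shell (the larger coordinate), then by the smaller coordinate, with
--     # the (hi, lo) form before the (lo, hi) form.
--     pairs = [(a, b) for a in range(1, 100) for b in range(1, 100)]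
--     pairs.sort(key=lambda p: (max(p), min(p), p[0] < p[1]))
--     return pairs[:neigs]
-- ===== Notes on version B (the rewrite author's own statement) =====
-- stated objective: alternative
-- what changed: B generates the full grid of pairs (a,b) with 1<=a,b<=99 as a comprehension and sorts it by (shell = larger coordinate, then smaller coordinate, with (hi,lo) before (lo,hi)), replacing A's incremental shell-by-shell interleaved construction; both then take the first neigs entries.
import Mathlib
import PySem

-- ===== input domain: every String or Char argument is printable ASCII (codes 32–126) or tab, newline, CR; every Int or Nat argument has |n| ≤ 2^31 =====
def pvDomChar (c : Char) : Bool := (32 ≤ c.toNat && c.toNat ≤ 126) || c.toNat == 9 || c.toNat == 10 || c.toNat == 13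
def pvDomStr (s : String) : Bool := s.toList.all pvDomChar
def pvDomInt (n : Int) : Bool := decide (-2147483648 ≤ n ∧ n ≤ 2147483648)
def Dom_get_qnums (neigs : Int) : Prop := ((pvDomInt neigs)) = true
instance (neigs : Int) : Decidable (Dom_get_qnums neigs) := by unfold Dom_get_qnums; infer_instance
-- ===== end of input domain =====

-- B builds the full grid of pairs and sorts it by (larger coordinate, smaller coordinate,
-- (hi,lo) before (lo,hi)) instead of A's incremental shell-by-shell interleaved
-- construction; both slice the first neigs entries (objective: alternative).

-- ===== PORT A =====
def get_qnums (neigs : Int) : List (Int × Int) :=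
  let qnums : List (Int × Int) :=
    (PySem.List.pyRange 1 100 1).foldl (fun qnums n =>
      let qnums := (PySem.List.pyRange 1 n 1).foldl
        (fun qnums i => (qnums ++ [(n, i)]) ++ [(i, n)]) qnums
      qnums ++ [(n, n)]) []
  PySem.List.slice qnums none (some neigs)

-- ===== PORT B =====
-- Python's sort key is the 3-tuple (max(p), min(p), p[0] < p[1]); tuple comparison in
-- Python is lexicographic and False < True compares as 0 < 1, so the key is ported
-- exactly as a nested Lex pair with the Bool rendered as the Int 0/1.  Python's
-- list.sort (a stable library sort) is ported as List.mergeSort, Lean's stable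
-- library sort; the keys below are all distinct, so stability never enters.
def pvKeyB (p : Int × Int) : Lex (Int × Lex (Int × Int)) :=
  toLex (max p.1 p.2, toLex (min p.1 p.2, if p.1 < p.2 then 1 else 0))

def get_qnums_alt (neigs : Int) : List (Int × Int) :=
  let pairs : List (Int × Int) :=
    (PySem.List.pyRange 1 100 1).flatMap (fun a =>
      (PySem.List.pyRange 1 100 1).map (fun b => (a, b)))
  let pairs := pairs.mergeSort (fun p q => decide (pvKeyB p ≤ pvKeyB q))
  PySem.List.slice pairs none (some neigs)

-- ===== PRECONDITION & SPEC =====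
def Spec_get_qnums (neigs : Int) (out : List (Int × Int)) : Prop := out = get_qnums_alt neigs
instance (neigs : Int) (out : List (Int × Int)) : Decidable (Spec_get_qnums neigs out) := by unfold Spec_get_qnums; infer_instance

-- ===== CLAIM (what is proved, stated in full; the proofs are below) =====
def Claim_equal_get_qnums : Prop := ∀ (neigs : Int), Dom_get_qnums neigs → Spec_get_qnums neigs (get_qnums neigs)

-- ===== LEMMAS AND PROOFS =====

-- closed form for the m-th pair of A's table (proof-only helper)
def pvF (m : Nat) : Int × Int :=
  let s := Nat.sqrt m
  let j := m - s * s
  if j = 2 * s then ((s : Int) + 1, (s : Int) + 1)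
  else if j % 2 = 0 then ((s : Int) + 1, ((j / 2 : Nat) : Int) + 1)
  else (((j / 2 : Nat) : Int) + 1, (s : Int) + 1)

-- one shell of A's table (proof-only helper)
def pvShell (n : Int) : List (Int × Int) :=
  (PySem.List.pyRange 1 n 1).flatMap (fun i => [(n, i), (i, n)]) ++ [(n, n)]

theorem pv_sqrt_eq (s m : Nat) (h1 : s * s ≤ m) (h2 : m < (s + 1) * (s + 1)) :
    Nat.sqrt m = s := by
  have c1 : s ≤ Nat.sqrt m := Nat.le_sqrt.mpr h1
  have c2 : Nat.sqrt m < s + 1 := Nat.sqrt_lt.mpr h2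
  omega

theorem pv_pairs_eq (n : Int) (M : Nat) :
    (PySem.List.pyRange 1 ((M : Int) + 1) 1).flatMap (fun i => [(n, i), (i, n)])
      = (List.range (2 * M)).map (fun j =>
          if j % 2 = 0 then (n, ((j / 2 : Nat) : Int) + 1) else (((j / 2 : Nat) : Int) + 1, n)) := by
  induction M with
  | zero => simp [PySem.List.pyRange_one_eq_nil]
  | succ M ih =>
      have h1 : ((M : Int) + 1) + 1 = ((M + 1 : Nat) : Int) + 1 := by push_cast; ring
      rw [← h1, PySem.List.pyRange_one_succ_right (by omega),
        List.flatMap_append, ih]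
      have h2 : 2 * (M + 1) = (2 * M + 1) + 1 := by ring
      rw [h2, List.range_succ, List.range_succ, List.map_append, List.map_append]
      have e0 : (2 * M) % 2 = 0 := by omega
      have e1 : (2 * M + 1) % 2 = 1 := by omega
      have d0 : (2 * M) / 2 = M := by omega
      have d1 : (2 * M + 1) / 2 = M := by omega
      simp [e0, e1]
      omega

theorem pv_shell_eq (M : Nat) :
    pvShell ((M : Int) + 1)
      = (List.range (2 * M + 1)).map (fun j =>
          if j = 2 * M then ((M : Int) + 1, (M : Int) + 1)
          else if j % 2 = 0 then ((M : Int) + 1, ((j / 2 : Nat) : Int) + 1)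
          else (((j / 2 : Nat) : Int) + 1, (M : Int) + 1)) := by
  unfold pvShell
  rw [pv_pairs_eq, List.range_succ, List.map_append]
  congr 1
  · refine List.map_congr_left ?_
    intro j hj
    have : j < 2 * M := List.mem_range.mp hj
    simp [show j ≠ 2 * M by omega]
  · simp

theorem pv_table_eq (N : Nat) :
    (PySem.List.pyRange 1 ((N : Int) + 1) 1).flatMap pvShell
      = (List.range (N * N)).map pvF := by
  induction N with
  | zero => simp [PySem.List.pyRange_one_eq_nil]
  | succ N ih =>
      have h1 : ((N : Int) + 1) + 1 = ((N + 1 : Nat) : Int) + 1 := by push_cast; ring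
      rw [← h1, PySem.List.pyRange_one_succ_right (by omega),
        List.flatMap_append, ih]
      have h2 : (N + 1) * (N + 1) = N * N + (2 * N + 1) := by ring
      rw [h2, List.range_add, List.map_append]
      congr 1
      simp only [List.flatMap_cons, List.flatMap_nil, List.append_nil]
      rw [pv_shell_eq, List.map_map]
      refine List.map_congr_left ?_
      intro j hj
      have hjlt : j < 2 * N + 1 := List.mem_range.mp hj
      have hsqrt : Nat.sqrt (N * N + j) = N := pv_sqrt_eq N _ (by omega) (by nlinarith)
      simp only [Function.comp_apply, pvF, hsqrt]
      have hsub : N * N + j - N * N = j := by omega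
      rw [hsub]

-- A's full table in closed form
theorem pv_A_table :
    (PySem.List.pyRange 1 100 1).foldl (fun qnums n =>
      ((PySem.List.pyRange 1 n 1).foldl
        (fun qnums i => (qnums ++ [(n, i)]) ++ [(i, n)]) qnums) ++ [(n, n)]) []
      = (List.range 9801).map pvF := by
  have hinner : ∀ (n : Int) (q : List (Int × Int)),
      (PySem.List.pyRange 1 n 1).foldl (fun q i => (q ++ [(n, i)]) ++ [(i, n)]) q
        = q ++ (PySem.List.pyRange 1 n 1).flatMap (fun i => [(n, i), (i, n)]) := by
    intro n q
    have hfn : (fun (q : List (Int × Int)) (i : Int) => (q ++ [(n, i)]) ++ [(i, n)])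
        = (fun q i => q ++ [(n, i), (i, n)]) := by
      funext q i; simp
    rw [hfn, PySem.List.foldl_append_eq_flatMap]
  have houter : (fun (q : List (Int × Int)) (n : Int) =>
      ((PySem.List.pyRange 1 n 1).foldl (fun q i => (q ++ [(n, i)]) ++ [(i, n)]) q) ++ [(n, n)])
      = (fun q n => q ++ pvShell n) := by
    funext q n
    rw [hinner, pvShell, List.append_assoc]
  rw [houter, PySem.List.foldl_append_eq_flatMap, List.nil_append]
  have h100 : (100 : Int) = ((99 : Nat) : Int) + 1 := by norm_num
  rw [h100, pv_table_eq]

-- the sort key of the m-th pair of A's table, in closed form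
theorem pv_key_pvF (s j : Nat) (hj : j ≤ 2 * s) :
    pvKeyB (pvF (s * s + j))
      = toLex ((s : Int) + 1, toLex (((j / 2 : Nat) : Int) + 1, ((j % 2 : Nat) : Int))) := by
  have hsqrt : Nat.sqrt (s * s + j) = s := pv_sqrt_eq s _ (by omega) (by nlinarith)
  have hsub : s * s + j - s * s = j := by omega
  simp only [pvF, hsqrt, hsub]
  by_cases hd : j = 2 * s
  · have hdiv : j / 2 = s := by omega
    have hmod : j % 2 = 0 := by omega
    simp [hd, pvKeyB]
  · have hlt : j < 2 * s := by omega
    have hhalf : j / 2 < s := by omega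
    by_cases he : j % 2 = 0
    · simp only [if_neg hd, if_pos he, pvKeyB]
      have h1 : max ((s : Int) + 1) (((j / 2 : Nat) : Int) + 1) = (s : Int) + 1 := by
        rw [max_eq_left]; exact_mod_cast by omega
      have h2 : min ((s : Int) + 1) (((j / 2 : Nat) : Int) + 1) = ((j / 2 : Nat) : Int) + 1 := by
        rw [min_eq_right]; exact_mod_cast by omega
      have h3 : ¬ ((s : Int) + 1 < ((j / 2 : Nat) : Int) + 1) := by exact_mod_cast by omega
      rw [h1, h2, if_neg h3, he]
      norm_num
    · simp only [if_neg hd, if_neg he, pvKeyB]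
      have h1 : max (((j / 2 : Nat) : Int) + 1) ((s : Int) + 1) = (s : Int) + 1 := by
        rw [max_eq_right]; exact_mod_cast by omega
      have h2 : min (((j / 2 : Nat) : Int) + 1) ((s : Int) + 1) = ((j / 2 : Nat) : Int) + 1 := by
        rw [min_eq_left]; exact_mod_cast by omega
      have h3 : (((j / 2 : Nat) : Int) + 1 < (s : Int) + 1) := by exact_mod_cast by omega
      have h4 : j % 2 = 1 := by omega
      rw [h1, h2, if_pos h3, h4]
      norm_num

-- the keys of A's table are strictly increasing (abstract shell/slot form)
theorem pv_key_mono' (s j s' j' : Nat) (_hj : j ≤ 2 * s) (hj' : j' ≤ 2 * s')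
    (h : s * s + j < s' * s' + j') :
    toLex ((s : Int) + 1, toLex (((j / 2 : Nat) : Int) + 1, ((j % 2 : Nat) : Int)))
      < toLex ((s' : Int) + 1, toLex (((j' / 2 : Nat) : Int) + 1, ((j' % 2 : Nat) : Int))) := by
  have hss : s ≤ s' := by
    by_contra hc
    have hle : s' + 1 ≤ s := by omega
    have hsq : (s' + 1) * (s' + 1) ≤ s * s := Nat.mul_le_mul hle hle
    have hexp : (s' + 1) * (s' + 1) = s' * s' + 2 * s' + 1 := by ring
    omega
  rw [Prod.Lex.lt_iff]
  simp only [ofLex_toLex]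
  rcases eq_or_lt_of_le hss with he | hlt
  · subst he
    right
    have hjj : j < j' := by omega
    refine ⟨rfl, ?_⟩
    rw [Prod.Lex.lt_iff]
    simp only [ofLex_toLex]
    by_cases hh : j / 2 < j' / 2
    · left
      have := hh
      exact_mod_cast by omega
    · right
      have hde : j / 2 = j' / 2 := by omega
      have hme : j % 2 < j' % 2 := by omega
      exact ⟨by rw [hde], by exact_mod_cast hme⟩
  · left
    exact_mod_cast by omega

-- the keys of A's table are strictly increasing
theorem pv_key_mono (m m' : Nat) (h : m < m') : pvKeyB (pvF m) < pvKeyB (pvF m') := by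
  set s := Nat.sqrt m with hs
  set s' := Nat.sqrt m' with hs'
  have hb1 : s * s ≤ m := by simpa [pow_two, hs] using Nat.sqrt_le' m
  have hb2 : m < (s + 1) * (s + 1) := by
    simpa [Nat.succ_eq_add_one, pow_two, hs] using Nat.lt_succ_sqrt' m
  have hb1' : s' * s' ≤ m' := by simpa [pow_two, hs'] using Nat.sqrt_le' m'
  have hb2' : m' < (s' + 1) * (s' + 1) := by
    simpa [Nat.succ_eq_add_one, pow_two, hs'] using Nat.lt_succ_sqrt' m'
  have hexp : (s + 1) * (s + 1) = s * s + 2 * s + 1 := by ring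
  have hexp' : (s' + 1) * (s' + 1) = s' * s' + 2 * s' + 1 := by ring
  set j := m - s * s with hj
  set j' := m' - s' * s' with hj'
  have hjle : j ≤ 2 * s := by omega
  have hjle' : j' ≤ 2 * s' := by omega
  have hm : m = s * s + j := by omega
  have hm' : m' = s' * s' + j' := by omega
  rw [hm, hm', pv_key_pvF s j hjle, pv_key_pvF s' j' hjle']
  exact pv_key_mono' s j s' j' hjle hjle' (by omega)

-- each pair of A's table lies in the 1..99 grid
theorem pv_pvF_mem (m : Nat) (hm : m < 9801) :
    1 ≤ (pvF m).1 ∧ (pvF m).1 < 100 ∧ 1 ≤ (pvF m).2 ∧ (pvF m).2 < 100 := by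
  set s := Nat.sqrt m with hs
  have hb1 : s * s ≤ m := by simpa [pow_two, hs] using Nat.sqrt_le' m
  have hb2 : m < (s + 1) * (s + 1) := by
    simpa [Nat.succ_eq_add_one, pow_two, hs] using Nat.lt_succ_sqrt' m
  have hs99 : s < 99 := by rw [hs]; exact Nat.sqrt_lt.mpr (by omega)
  have hexp : (s + 1) * (s + 1) = s * s + 2 * s + 1 := by ring
  have hhalf : (m - s * s) / 2 ≤ 98 := by omega
  simp only [pvF, ← hs]
  split_ifs <;> refine ⟨?_, ?_, ?_, ?_⟩ <;> omega

-- every pair of the 1..99 grid occurs in A's table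
theorem pv_surj (x y : Int) (hx1 : 1 ≤ x) (hx2 : x < 100) (hy1 : 1 ≤ y) (hy2 : y < 100) :
    ∃ m : Nat, m < 9801 ∧ pvF m = (x, y) := by
  set a := x.toNat with ha
  set b := y.toNat with hb
  have hxa : x = (a : Int) := by omega
  have hyb : y = (b : Int) := by omega
  have ha1 : 1 ≤ a := by omega
  have ha2 : a ≤ 99 := by omega
  have hb1 : 1 ≤ b := by omega
  have hb2 : b ≤ 99 := by omega
  rcases lt_trichotomy a b with hab | hab | hab
  · -- x < y : odd slot of shell b
    have hbb : (b - 1) * (b - 1) ≤ 98 * 98 := Nat.mul_le_mul (by omega) (by omega)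
    have hexp : (b - 1 + 1) * (b - 1 + 1) = (b - 1) * (b - 1) + 2 * (b - 1) + 1 := by ring
    refine ⟨(b - 1) * (b - 1) + (2 * (a - 1) + 1), by omega, ?_⟩
    have hjle : 2 * (a - 1) + 1 ≤ 2 * (b - 1) := by omega
    have hsqrt : Nat.sqrt ((b - 1) * (b - 1) + (2 * (a - 1) + 1)) = b - 1 :=
      pv_sqrt_eq _ _ (by omega) (by omega)
    have hsub : (b - 1) * (b - 1) + (2 * (a - 1) + 1) - (b - 1) * (b - 1) = 2 * (a - 1) + 1 := by
      omega
    have hne : ¬ (2 * (a - 1) + 1 = 2 * (b - 1)) := by omega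
    have hodd : ¬ ((2 * (a - 1) + 1) % 2 = 0) := by omega
    have hdiv : (2 * (a - 1) + 1) / 2 = a - 1 := by omega
    simp only [pvF, hsqrt, hsub, if_neg hne, if_neg hodd, hdiv]
    rw [hxa, hyb]
    exact Prod.ext (by push_cast; omega) (by push_cast; omega)
  · -- x = y : diagonal slot of shell a
    have haa : (a - 1) * (a - 1) ≤ 98 * 98 := Nat.mul_le_mul (by omega) (by omega)
    have hexp : (a - 1 + 1) * (a - 1 + 1) = (a - 1) * (a - 1) + 2 * (a - 1) + 1 := by ring
    refine ⟨(a - 1) * (a - 1) + 2 * (a - 1), by omega, ?_⟩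
    have hsqrt : Nat.sqrt ((a - 1) * (a - 1) + 2 * (a - 1)) = a - 1 :=
      pv_sqrt_eq _ _ (by omega) (by omega)
    have hsub : (a - 1) * (a - 1) + 2 * (a - 1) - (a - 1) * (a - 1) = 2 * (a - 1) := by omega
    simp only [pvF, hsqrt, hsub]
    rw [hxa, hyb]
    exact Prod.ext (by push_cast; omega) (by push_cast; omega)
  · -- x > y : even slot of shell a
    have haa : (a - 1) * (a - 1) ≤ 98 * 98 := Nat.mul_le_mul (by omega) (by omega)
    have hexp : (a - 1 + 1) * (a - 1 + 1) = (a - 1) * (a - 1) + 2 * (a - 1) + 1 := by ring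
    refine ⟨(a - 1) * (a - 1) + 2 * (b - 1), by omega, ?_⟩
    have hsqrt : Nat.sqrt ((a - 1) * (a - 1) + 2 * (b - 1)) = a - 1 :=
      pv_sqrt_eq _ _ (by omega) (by omega)
    have hsub : (a - 1) * (a - 1) + 2 * (b - 1) - (a - 1) * (a - 1) = 2 * (b - 1) := by omega
    have hne : ¬ (2 * (b - 1) = 2 * (a - 1)) := by omega
    have heven : (2 * (b - 1)) % 2 = 0 := by omega
    have hdiv : (2 * (b - 1)) / 2 = b - 1 := by omega
    simp only [pvF, hsqrt, hsub, if_neg hne, if_pos heven, hdiv]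
    rw [hxa, hyb]
    exact Prod.ext (by push_cast; omega) (by push_cast; omega)

-- the keys along A's table are pairwise strictly increasing
theorem pv_table_pairwise :
    ((List.range 9801).map pvF).Pairwise (fun p q => pvKeyB p < pvKeyB q) := by
  refine List.Pairwise.map pvF ?_ List.pairwise_lt_range
  intro m m' h
  exact pv_key_mono m m' h

-- A's table has no duplicate pairs
theorem pv_table_nodup : ((List.range 9801).map pvF).Nodup := by
  refine List.Pairwise.imp ?_ pv_table_pairwise
  intro p q hlt heq
  rw [heq] at hlt
  exact lt_irrefl _ hlt

-- the sort key determines the pair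
theorem pv_key_inj : Function.Injective pvKeyB := by
  rintro ⟨a, b⟩ ⟨c, d⟩ h
  simp only [pvKeyB, toLex_inj, Prod.mk.injEq] at h
  obtain ⟨h1, h2, h3⟩ := h
  simp only [Prod.mk.injEq]
  split_ifs at h3 <;> constructor <;> omega

-- B's grid is a permutation of A's table
theorem pv_grid_perm :
    ((PySem.List.pyRange 1 100 1).flatMap (fun a =>
      (PySem.List.pyRange 1 100 1).map (fun b => (a, b)))).Perm
      ((List.range 9801).map pvF) := by
  have hgrid : (PySem.List.pyRange 1 100 1).flatMap (fun a =>
      (PySem.List.pyRange 1 100 1).map (fun b => (a, b)))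
      = (PySem.List.pyRange 1 100 1).product (PySem.List.pyRange 1 100 1) := rfl
  rw [hgrid]
  have hnd : ((PySem.List.pyRange 1 100 1).product (PySem.List.pyRange 1 100 1)).Nodup :=
    List.Nodup.product (PySem.List.nodup_pyRange_one 1 100) (PySem.List.nodup_pyRange_one 1 100)
  rw [List.perm_ext_iff_of_nodup hnd pv_table_nodup]
  rintro ⟨x, y⟩
  rw [List.pair_mem_product, PySem.List.mem_pyRange_one, PySem.List.mem_pyRange_one]
  constructor
  · rintro ⟨⟨hx1, hx2⟩, hy1, hy2⟩
    obtain ⟨m, hm, heq⟩ := pv_surj x y hx1 hx2 hy1 hy2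
    exact List.mem_map.mpr ⟨m, List.mem_range.mpr hm, heq⟩
  · intro hmem
    obtain ⟨m, hm, heq⟩ := List.mem_map.mp hmem
    have hm' : m < 9801 := List.mem_range.mp hm
    have := pv_pvF_mem m hm'
    rw [heq] at this
    exact ⟨⟨this.1, this.2.1⟩, this.2.2.1, this.2.2.2⟩

-- sorting B's grid yields exactly A's table
theorem pv_sorted_grid :
    ((PySem.List.pyRange 1 100 1).flatMap (fun a =>
      (PySem.List.pyRange 1 100 1).map (fun b => (a, b)))).mergeSort
        (fun p q => decide (pvKeyB p ≤ pvKeyB q))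
      = (List.range 9801).map pvF := by
  refine PySem.List.eq_of_perm_of_pairwise_le_of_injective pvKeyB pv_key_inj
    ((List.mergeSort_perm _ _).trans pv_grid_perm) ?_ ?_
  · have hp := List.pairwise_mergeSort
      (le := fun p q => decide (pvKeyB p ≤ pvKeyB q))
      (fun a b c hab hbc => by
        simp only [decide_eq_true_eq] at *
        exact le_trans hab hbc)
      (fun a b => by
        simp only [Bool.or_eq_true, decide_eq_true_eq]
        exact le_total (pvKeyB a) (pvKeyB b))
      ((PySem.List.pyRange 1 100 1).flatMap (fun a =>
        (PySem.List.pyRange 1 100 1).map (fun b => (a, b))))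
    refine hp.imp ?_
    intro a b hab
    simpa using hab
  · exact pv_table_pairwise.imp (fun h => le_of_lt h)

-- ===== VERDICT (by name: the statement is the Claim_ definition above) =====
theorem get_qnums_spec : Claim_equal_get_qnums := by
  intro neigs _
  unfold Spec_get_qnums
  show get_qnums neigs = get_qnums_alt neigs
  simp only [get_qnums, get_qnums_alt, pv_A_table, pv_sorted_grid]
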